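-- pv_equiv track=rewrite | github.com/rishivardhan99/Multi-Model-AI-Agent-for-Automated-Health-Diagnostics- | model3/guardrails.py | redact_recommendations
-- ===== SOURCE A (Python) =====
-- from typing import List, Tuple, Any, Dict
--
-- DANGEROUS_KEYWORDS = [
--     "prescribe", "dosage", "dose", "administer", "surgery",
--     "immediate hospitalization", "hospitalize", "call 911", "emergency",
--     "must take", "take as directed", "inject", "injectable"
-- ]
--
-- SAFE_REDACT_PLACEHOLDER = "Recommendation removed for safety; consult a clinician."
--
-- def _find_offenders(text: str) -> List[str]:
--     if not isinstance(text, str):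
--         return []
--     low = text.lower()
--     offenders = [k for k in DANGEROUS_KEYWORDS if k in low]
--     return offenders
--
-- def redact_recommendations(items: List[str]) -> List[str]:
--     """
--     Replace any item containing dangerous keywords with a safe placeholder.
--     """
--     out = []
--     for it in items:
--         if not isinstance(it, str):
--             out.append(SAFE_REDACT_PLACEHOLDER)
--             continue
--         if _find_offenders(it):
--             out.append(SAFE_REDACT_PLACEHOLDER)
--         else:
--             out.append(it)
--     return out
-- ===== SOURCE B (Python) =====
-- from typing import List
--
-- DANGEROUS_KEYWORDS = [
--     "prescribe", "dosage", "dose", "administer", "surgery",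
--     "immediate hospitalization", "hospitalize", "call 911", "emergency",
--     "must take", "take as directed", "inject", "injectable"
-- ]
--
-- SAFE_REDACT_PLACEHOLDER = "Recommendation removed for safety; consult a clinician."
--
-- def _is_dangerous(low: str) -> bool:
--     # single left-to-right scan: at each position, does some keyword start here?
--     for i in range(len(low)):
--         for k in DANGEROUS_KEYWORDS:
--             if low.startswith(k, i):
--                 return True
--     return False
--
-- def redact_recommendations(items: List[str]) -> List[str]:
--     return [
--         SAFE_REDACT_PLACEHOLDER
--         if not isinstance(it, str) or _is_dangerous(it.lower())
--         else it
--         for it in items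
--     ]
-- ===== Notes on version B (the rewrite author's own statement) =====
-- stated objective: alternative
-- what changed: B replaces the 13 independent substring membership tests per item with one left-to-right scan of the lowered item that checks at each position whether some keyword starts there (and drops the offenders-list helper), mapping items directly to placeholder-or-item.
import Mathlib
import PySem

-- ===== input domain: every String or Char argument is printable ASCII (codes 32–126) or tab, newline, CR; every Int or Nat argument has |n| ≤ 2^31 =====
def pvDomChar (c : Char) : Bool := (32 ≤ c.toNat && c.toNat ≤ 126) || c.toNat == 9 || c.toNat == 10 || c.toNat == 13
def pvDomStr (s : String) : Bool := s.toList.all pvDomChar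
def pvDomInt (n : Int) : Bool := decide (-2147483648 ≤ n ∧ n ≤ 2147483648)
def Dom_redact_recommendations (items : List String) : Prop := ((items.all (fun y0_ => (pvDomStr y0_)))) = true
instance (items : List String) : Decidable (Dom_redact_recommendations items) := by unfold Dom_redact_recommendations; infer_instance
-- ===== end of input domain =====

-- B performs one positional scan of each lowered item instead of A's 13 separate substring tests; alternative structure, same values.

def DANGEROUS_KEYWORDS : List String :=
  ["prescribe", "dosage", "dose", "administer", "surgery",
   "immediate hospitalization", "hospitalize", "call 911", "emergency",
   "must take", "take as directed", "inject", "injectable"]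

def SAFE_REDACT_PLACEHOLDER : String := "Recommendation removed for safety; consult a clinician."

-- ===== PORT A =====
-- (isinstance(it, str) is always true under the List String signature, so those branches are vacuous)
def find_offenders (text : String) : List String :=
  let low := PySem.Str.lower text
  DANGEROUS_KEYWORDS.filter (fun k => PySem.Str.isIn k low)

def redact_recommendations (items : List String) : List String :=
  items.foldl
    (fun out it =>
      if find_offenders it ≠ [] then out ++ [SAFE_REDACT_PLACEHOLDER]
      else out ++ [it])
    []

-- ===== PORT B =====
-- scan over the lowered characters: at each position, does some keyword start here?
def is_dangerous (low : List Char) : Bool :=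
  match low with
  | [] => false
  | _ :: t => DANGEROUS_KEYWORDS.any (fun k => PySem.Chars.startswith low k.toList) || is_dangerous t

def redact_recommendations_alt (items : List String) : List String :=
  items.map (fun it =>
    if is_dangerous (PySem.Str.lower it).toList then SAFE_REDACT_PLACEHOLDER else it)

-- ===== PRECONDITION & SPEC =====
def Spec_redact_recommendations (items : List String) (out : List String) : Prop := out = redact_recommendations_alt items
instance (items : List String) (out : List String) : Decidable (Spec_redact_recommendations items out) := by unfold Spec_redact_recommendations; infer_instance

-- ===== CLAIM (what is proved, stated in full; the proofs are below) =====
def Claim_equal_redact_recommendations : Prop := ∀ (items : List String), Dom_redact_recommendations items → Spec_redact_recommendations items (redact_recommendations items)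

-- ===== LEMMAS AND PROOFS =====

theorem is_dangerous_eq_any_isIn (cs : List Char) :
    is_dangerous cs = DANGEROUS_KEYWORDS.any (fun k => PySem.Chars.isIn k.toList cs) := by
  induction cs with
  | nil => decide
  | cons c t ih =>
    have hpt : ∀ k : String,
        PySem.Chars.isIn k.toList (c :: t)
          = (PySem.Chars.startswith (c :: t) k.toList || PySem.Chars.isIn k.toList t) := by
      intro k
      rw [Bool.eq_iff_iff]
      simp [PySem.Chars.isIn_iff_infix, PySem.Chars.startswith_iff, List.infix_cons_iff]
    rw [is_dangerous, ih]
    rw [PySem.List.any_congr_mem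
      (g := fun k => PySem.Chars.startswith (c :: t) k.toList || PySem.Chars.isIn k.toList t)
      (fun k _ => hpt k)]
    rw [Bool.eq_iff_iff]
    simp only [Bool.or_eq_true, List.any_eq_true]
    constructor
    · rintro (⟨k, hk, h⟩ | ⟨k, hk, h⟩) <;> exact ⟨k, hk, by simp [h]⟩
    · rintro ⟨k, hk, h | h⟩
      · exact Or.inl ⟨k, hk, h⟩
      · exact Or.inr ⟨k, hk, h⟩

theorem redact_recommendations_spec : Claim_equal_redact_recommendations := by
  intro items _
  show redact_recommendations items = redact_recommendations_alt items
  unfold redact_recommendations redact_recommendations_alt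
  have hbody : ∀ (out : List String) (it : String),
      (if find_offenders it ≠ [] then out ++ [SAFE_REDACT_PLACEHOLDER] else out ++ [it])
        = out ++ [if is_dangerous (PySem.Str.lower it).toList then SAFE_REDACT_PLACEHOLDER else it] := by
    intro out it
    have hc : (find_offenders it ≠ []) ↔ is_dangerous (PySem.Str.lower it).toList = true := by
      rw [is_dangerous_eq_any_isIn]
      unfold find_offenders
      simp [List.any_eq_true, PySem.Str.isIn_eq, ne_eq, List.filter_eq_nil_iff, not_forall]
    by_cases h : is_dangerous (PySem.Str.lower it).toList = true
    · rw [if_pos (hc.mpr h), if_pos h]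
    · rw [if_neg (fun hn => h (hc.mp hn)), if_neg h]
  calc items.foldl
        (fun out it =>
          if find_offenders it ≠ [] then out ++ [SAFE_REDACT_PLACEHOLDER] else out ++ [it]) []
      = items.foldl
        (fun out it =>
          out ++ [if is_dangerous (PySem.Str.lower it).toList then SAFE_REDACT_PLACEHOLDER else it]) [] :=
        PySem.List.foldl_congr_mem items _ _ _ (fun out it _ => hbody out it)
    _ = _ := by
        rw [PySem.List.foldl_append_singleton_eq_map]; simp

-- ===== VERDICT (by name: the statement is the Claim_ definition above) =====
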